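-- pv_equiv track=rewrite | github.com/Wojti-7/logia | Inne/zolw.py | ile
-- ===== SOURCE A (Python) =====
-- def ile(n):
--     predkosc = 1
--     for i in range(2, n+1, 1):
--         if (i%2 == 0):
--             predkosc = predkosc+3
--         if (i%2 == 1):
--             predkosc = predkosc-1
--         if (i%12 == 1):
--             predkosc = predkosc-9
--     return predkosc
-- ===== SOURCE B (Python) =====
-- def ile(n):
--     # Closed form: in [2..n] there are n//2 even i (+3 each),
--     # (n+1)//2 - 1 odd i (-1 each), and (n-1)//12 values with i%12 == 1 (-9 each).
--     if n < 2:
--         return 1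
--     return 1 + 3 * (n // 2) - ((n + 1) // 2 - 1) - 9 * ((n - 1) // 12)
-- ===== Notes on version B (the rewrite author's own statement) =====
-- stated objective: faster
-- what changed: Replaced the O(n) accumulation loop by an O(1) closed form that counts even i, odd i and i%12==1 hits in [2..n] with floor divisions.
import Mathlib
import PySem

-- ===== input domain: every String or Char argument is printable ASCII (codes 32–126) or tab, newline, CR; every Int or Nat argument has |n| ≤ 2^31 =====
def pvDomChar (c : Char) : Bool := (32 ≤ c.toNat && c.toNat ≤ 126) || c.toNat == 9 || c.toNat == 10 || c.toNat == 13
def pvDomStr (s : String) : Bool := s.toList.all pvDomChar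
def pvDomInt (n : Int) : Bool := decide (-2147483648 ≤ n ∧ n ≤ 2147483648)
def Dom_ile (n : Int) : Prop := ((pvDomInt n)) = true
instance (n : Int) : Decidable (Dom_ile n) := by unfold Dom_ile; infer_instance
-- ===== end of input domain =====

-- B replaces A's O(n) accumulation loop by an O(1) closed form counting evens, odds and i%12==1 hits by division.

-- ===== PORT A =====
def ileStep (predkosc i : Int) : Int :=
  let p1 := if PySem.Int.mod i 2 = 0 then predkosc + 3 else predkosc
  let p2 := if PySem.Int.mod i 2 = 1 then p1 - 1 else p1
  if PySem.Int.mod i 12 = 1 then p2 - 9 else p2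

def ile (n : Int) : Int :=
  (PySem.List.pyRange 2 (n + 1) 1).foldl ileStep 1

-- ===== PORT B =====
def ile_alt (n : Int) : Int :=
  if n < 2 then 1
  else 1 + 3 * PySem.Int.floordiv n 2 - (PySem.Int.floordiv (n + 1) 2 - 1)
         - 9 * PySem.Int.floordiv (n - 1) 12

-- ===== PRECONDITION & SPEC =====
def Spec_ile (n : Int) (out : Int) : Prop := out = ile_alt n
instance (n : Int) (out : Int) : Decidable (Spec_ile n out) := by unfold Spec_ile; infer_instance

-- ===== CLAIM (what is proved, stated in full; the proofs are below) =====
def Claim_equal_ile : Prop := ∀ (n : Int), Dom_ile n → Spec_ile n (ile n)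

-- ===== LEMMAS AND PROOFS =====

theorem step_closed (m : Int) (h : 2 ≤ m) : ileStep (ile_alt (m - 1)) m = ile_alt m := by
  simp only [ileStep, ile_alt,
    PySem.Int.mod_eq_emod_of_pos (show (0:Int) < 2 by omega),
    PySem.Int.mod_eq_emod_of_pos (show (0:Int) < 12 by omega),
    PySem.Int.floordiv_eq_ediv_of_pos (show (0:Int) < 2 by omega),
    PySem.Int.floordiv_eq_ediv_of_pos (show (0:Int) < 12 by omega)]
  split_ifs <;> omega

theorem ile_key (k : Nat) : ile (1 + k) = ile_alt (1 + k) := by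
  induction k with
  | zero =>
      simp [ile, ile_alt]
  | succ k ih =>
      have e1 : (1:Int) + ((k + 1 : Nat) : Int) = (1 + (k:Int)) + 1 := by push_cast; ring
      rw [e1]
      unfold ile at ih ⊢
      rw [PySem.List.pyRange_one_succ_right (show (2:Int) ≤ (1 + (k:Int)) + 1 by omega),
          List.foldl_append, ih]
      simp only [List.foldl_cons, List.foldl_nil]
      have hs := step_closed ((1 + (k:Int)) + 1) (by omega)
      rw [show (1 + (k:Int)) + 1 - 1 = 1 + (k:Int) by ring] at hs
      exact hs

theorem ile_spec' (n : Int) : ile n = ile_alt n := by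
  by_cases h : 1 ≤ n
  · have : n = 1 + ((n - 1).toNat : Int) := by omega
    rw [this]; exact ile_key _
  · unfold ile ile_alt
    rw [PySem.List.pyRange_one_eq_nil (by omega)]
    simp; omega

-- ===== VERDICT (by name: the statement is the Claim_ definition above) =====
theorem ile_spec : Claim_equal_ile := by
  intro n _
  unfold Spec_ile
  exact ile_spec' n
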